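-- pv_equiv track=rewrite | github.com/sophialberton/integracaoSeniorGupy | src/utils/colaboradores.py | extrair_email_valido
-- ===== SOURCE A (Python) =====
-- def extrair_email_valido(e):
--     if not isinstance(e, str):
--         return None
--     emails = e.replace(',', ' ').split()
--     email_fgm_dental = None
--     email_fgm_ind = None
--
--     for email in emails:
--         email = email.strip()
--         if "@fgmdentalgroup.com" in email:
--             email_fgm_dental = email
--         elif "@fgm.ind.br" in email:
--             email_fgm_ind = email
--
--     if email_fgm_dental:
--         return email_fgm_dental
--     elif email_fgm_ind:
--         return email_fgm_ind # .replace("@fgm.ind.br", "@fgmdentalgroup.com") # Troca o domínio para @fgmdentalgroup.com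
--     else:
--         return None
-- ===== SOURCE B (Python) =====
-- def extrair_email_valido(e):
--     if not isinstance(e, str):
--         return None
--     emails = [t.strip() for t in e.replace(',', ' ').split()]
--     dental = next((t for t in reversed(emails) if "@fgmdentalgroup.com" in t), None)
--     if dental is not None:
--         return dental
--     return next((t for t in reversed(emails) if "@fgm.ind.br" in t), None)
-- ===== Notes on version B (the rewrite author's own statement) =====
-- stated objective: idiomatic
-- what changed: Replaces the forward last-wins overwrite loop with two reverse-order searches (next over reversed tokens) selecting the last dental match, else the last ind match.
import Mathlib
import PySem

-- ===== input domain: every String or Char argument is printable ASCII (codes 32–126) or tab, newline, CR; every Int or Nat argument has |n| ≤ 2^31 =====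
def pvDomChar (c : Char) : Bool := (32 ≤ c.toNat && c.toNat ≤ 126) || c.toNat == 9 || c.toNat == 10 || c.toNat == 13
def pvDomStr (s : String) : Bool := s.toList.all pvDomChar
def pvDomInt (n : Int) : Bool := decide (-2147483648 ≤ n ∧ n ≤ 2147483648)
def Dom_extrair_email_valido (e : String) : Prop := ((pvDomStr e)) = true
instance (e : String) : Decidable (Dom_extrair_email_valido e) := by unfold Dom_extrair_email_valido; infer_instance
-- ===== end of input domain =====

-- B replaces A's forward last-wins overwrite loop with two reverse-order searches (idiomatic decomposition); return values agree everywhere.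

-- ===== PORT A =====
-- Python truthiness of an Optional[str]: None and "" are falsy.
def pvTruthy : Option String → Bool
  | none => false
  | some s => !s.toList.isEmpty

def extrair_email_valido (e : String) : Option String :=
  let emails := PySem.Str.split₀ (PySem.Str.replace e "," " ")
  let st := emails.foldl (fun (acc : Option String × Option String) email =>
      let email := PySem.Str.strip email
      if PySem.Str.isIn "@fgmdentalgroup.com" email then (some email, acc.2)
      else if PySem.Str.isIn "@fgm.ind.br" email then (acc.1, some email)
      else acc)
    (none, none)
  if pvTruthy st.1 then st.1
  else if pvTruthy st.2 then st.2
  else none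

-- ===== PORT B =====
def extrair_email_valido_alt (e : String) : Option String :=
  let emails := (PySem.Str.split₀ (PySem.Str.replace e "," " ")).map PySem.Str.strip
  match emails.reverse.find? (fun t => PySem.Str.isIn "@fgmdentalgroup.com" t) with
  | some d => some d
  | none => emails.reverse.find? (fun t => PySem.Str.isIn "@fgm.ind.br" t)

-- ===== PRECONDITION & SPEC =====
def Spec_extrair_email_valido (e : String) (out : Option String) : Prop := out = extrair_email_valido_alt e
instance (e : String) (out : Option String) : Decidable (Spec_extrair_email_valido e out) := by unfold Spec_extrair_email_valido; infer_instance

-- ===== CLAIM (what is proved, stated in full; the proofs are below) =====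
def Claim_equal_extrair_email_valido : Prop := ∀ (e : String), Dom_extrair_email_valido e → Spec_extrair_email_valido e (extrair_email_valido e)

-- ===== LEMMAS AND PROOFS =====

-- the two membership predicates, named so simp does not unfold them mid-proof
def pvP1 (t : String) : Bool := PySem.Str.isIn "@fgmdentalgroup.com" t
def pvP2 (t : String) : Bool := PySem.Str.isIn "@fgm.ind.br" t

-- A's loop step, after the in-loop strip has been pushed onto the token list (foldl_map).
def pvStep (acc : Option String × Option String) (t : String) : Option String × Option String :=
  if pvP1 t then (some t, acc.2)
  else if pvP2 t then (acc.1, some t)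
  else acc

-- first component of A's loop = last token matching the dental predicate (reverse find), falling back to the accumulator
theorem pvLoop_fst (us : List String) (d i : Option String) :
    (us.foldl pvStep (d, i)).1 = ((us.reverse.find? pvP1).or d) := by
  induction us generalizing d i with
  | nil => simp
  | cons t us ih =>
    simp only [List.foldl_cons, List.reverse_cons, List.find?_append]
    cases hf : us.reverse.find? pvP1 with
    | some x => rw [ih]; simp [hf]
    | none =>
      rw [ih]
      simp only [hf]
      unfold pvStep
      split_ifs with h1 h2 <;> simp [List.find?, h1]

-- when no token matches the dental predicate, the second component = last token matching the ind predicate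
theorem pvLoop_snd (us : List String) (d i : Option String)
    (h : ∀ t ∈ us, pvP1 t = false) :
    (us.foldl pvStep (d, i)).2 = ((us.reverse.find? pvP2).or i) := by
  induction us generalizing d i with
  | nil => simp
  | cons t us ih =>
    have ht : pvP1 t = false := h t (by simp)
    have h' : ∀ u ∈ us, pvP1 u = false := fun u hu => h u (by simp [hu])
    simp only [List.foldl_cons, List.reverse_cons, List.find?_append]
    cases hf : us.reverse.find? pvP2 with
    | some x => rw [ih _ _ h']; simp [hf]
    | none =>
      rw [ih _ _ h']
      simp only [hf]
      unfold pvStep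
      split_ifs with h1 h2 <;> simp_all [List.find?]

-- a token matching either predicate is a nonempty string, hence Python-truthy
theorem pvTruthy_of_isIn (sub t : String) (hsub : sub.toList ≠ [])
    (h : PySem.Str.isIn sub t = true) : pvTruthy (some t) = true := by
  have hinf : sub.toList <:+: t.toList := (PySem.Str.isIn_iff_infix sub t).mp h
  have : t.toList ≠ [] := by
    intro he
    rw [he] at hinf
    exact hsub (List.eq_nil_of_infix_nil hinf)
  simp [pvTruthy, this]

-- ===== VERDICT (by name: the statement is the Claim_ definition above) =====
theorem extrair_email_valido_spec : Claim_equal_extrair_email_valido := by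
  intro e _
  unfold Spec_extrair_email_valido extrair_email_valido extrair_email_valido_alt
  rw [show (fun t => PySem.Str.isIn "@fgmdentalgroup.com" t) = pvP1 from rfl,
      show (fun t => PySem.Str.isIn "@fgm.ind.br" t) = pvP2 from rfl]
  set us := (PySem.Str.split₀ (PySem.Str.replace e "," " ")).map PySem.Str.strip with hus
  have hfold :
      (PySem.Str.split₀ (PySem.Str.replace e "," " ")).foldl
        (fun (acc : Option String × Option String) email =>
          let email := PySem.Str.strip email
          if PySem.Str.isIn "@fgmdentalgroup.com" email then (some email, acc.2)
          else if PySem.Str.isIn "@fgm.ind.br" email then (acc.1, some email)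
          else acc) (none, none)
      = us.foldl pvStep (none, none) := by
    rw [hus, List.foldl_map]
    rfl
  simp only [hfold]
  rw [pvLoop_fst us none none]
  cases hfd : us.reverse.find? pvP1 with
  | some x =>
    have hx : pvP1 x = true := List.find?_some hfd
    simp [Option.or, pvTruthy_of_isIn "@fgmdentalgroup.com" x (by decide) hx]
  | none =>
    have hnone : ∀ t ∈ us, pvP1 t = false := by
      intro t ht
      simpa using List.find?_eq_none.mp hfd t (by simpa using ht)
    rw [pvLoop_snd us none none hnone]
    cases hfi : us.reverse.find? pvP2 with
    | some y =>
      have hy : pvP2 y = true := List.find?_some hfi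
      simp [Option.or, pvTruthy_of_isIn "@fgm.ind.br" y (by decide) hy, show pvTruthy none = false from rfl]
    | none =>
      simp [Option.or, pvTruthy]
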